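-- pv_equiv track=rewrite | github.com/Tibor-S/tmp | overlapping_NxN_tile_system.py | avgClr
-- ===== SOURCE A (Python) =====
-- def avgClr(clrs: list[str]):
--     try:
--         rs, gs, bs = ([int(clr[i:i+2], 16) for clr in clrs]
--                       for i in range(1, 7, 2))
--         rc, gc, bc = (sum(rs)//len(rs), sum(gs)//len(gs), sum(bs)//len(bs))
--         return '#%s%s%s' % (hex(rc)[2:].rjust(2, '0').upper(), hex(gc)[2:].rjust(2, '0').upper(), hex(bc)[2:].rjust(2, '0').upper())
--     except:
--         return '#0123456'
-- ===== SOURCE B (Python) =====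
-- def avgClr(clrs: list[str]):
--     try:
--         rt, gt, bt, n = _sums(clrs)
--         ra, ga, ba = rt // n, gt // n, bt // n
--         return '#%s%s%s' % (hex(ra)[2:].rjust(2, '0').upper(),
--                             hex(ga)[2:].rjust(2, '0').upper(),
--                             hex(ba)[2:].rjust(2, '0').upper())
--     except:
--         return '#0123456'
--
--
-- def _sums(clrs):
--     # divide-and-conquer: (rsum, gsum, bsum, count) of a sublist
--     if not clrs:
--         return (0, 0, 0, 0)
--     if len(clrs) == 1:
--         c = clrs[0]
--         return (int(c[1:3], 16), int(c[3:5], 16), int(c[5:7], 16), 1)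
--     k = len(clrs) // 2
--     r1, g1, b1, n1 = _sums(clrs[:k])
--     r2, g2, b2, n2 = _sums(clrs[k:])
--     return (r1 + r2, g1 + g2, b1 + b2, n1 + n2)
-- ===== Notes on version B (the rewrite author's own statement) =====
-- stated objective: alternative
-- what changed: Replaces the three per-channel list comprehensions (three linear passes, then sum/len on each list) by a divide-and-conquer recursion that splits the list in half and merges (rsum,gsum,bsum,count) tuples, correct because integer addition is associative and commutative; the bare-except '#0123456' sentinel and the exact hex formatting are kept.
import Mathlib
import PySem

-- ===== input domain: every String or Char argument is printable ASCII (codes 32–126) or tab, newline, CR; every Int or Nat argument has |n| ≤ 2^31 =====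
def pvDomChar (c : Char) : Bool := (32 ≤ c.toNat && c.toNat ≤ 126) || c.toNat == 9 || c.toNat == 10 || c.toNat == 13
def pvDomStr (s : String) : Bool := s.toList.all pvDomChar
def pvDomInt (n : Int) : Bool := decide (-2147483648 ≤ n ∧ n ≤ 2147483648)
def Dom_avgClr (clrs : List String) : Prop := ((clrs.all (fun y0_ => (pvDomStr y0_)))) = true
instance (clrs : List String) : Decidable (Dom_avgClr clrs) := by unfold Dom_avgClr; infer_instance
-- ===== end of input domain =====

-- B replaces A's three per-channel comprehension passes by a divide-and-conquer recursion
-- merging (rsum,gsum,bsum,count) tuples (same results, same sentinel); objective: alternative.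


-- shared primitives both Pythons invoke literally: int(clr[i:i+2], 16) and hex(c)[2:].rjust(2,'0').upper()

-- int(clr[i:i+2], 16)
def parseAt (clr : String) (i : Int) : Option Int :=
  PySem.Int.ofCharsBase? (PySem.List.slice clr.toList (some i) (some (i + 2))) 16

-- lowercase hex digits of a positive Nat (empty for 0); exact digits of hex(n) after the prefix
def natHexChars : Nat → List Char
  | 0 => []
  | n + 1 => natHexChars ((n + 1) / 16) ++ [Nat.digitChar ((n + 1) % 16)]

-- hex(n)[2:] : for n ≥ 0 the lowercase digits, for n < 0 'x' followed by the digits of -n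
def hexTail (n : Int) : List Char :=
  if n < 0 then 'x' :: natHexChars (-n).toNat
  else if n = 0 then ['0'] else natHexChars n.toNat

-- hex(c)[2:].rjust(2, '0').upper()
def fmtChan (n : Int) : List Char :=
  PySem.Chars.upper (List.replicate (2 - (hexTail n).length) '0' ++ hexTail n)

-- ===== PORT A =====
-- [int(clr[i:i+2], 16) for clr in clrs]  (none = some element raised ValueError)
def compAt (i : Int) : List String → Option (List Int)
  | [] => some []
  | clr :: rest =>
    match parseAt clr i, compAt i rest with
    | some v, some vs => some (v :: vs)
    | _, _ => none

def avgClr (clrs : List String) : String :=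
  match compAt 1 clrs, compAt 3 clrs, compAt 5 clrs with
  | some rs, some gs, some bs =>
    if rs.length = 0 then "#0123456"   -- ZeroDivisionError caught by the bare except
    else
      let rc := PySem.Int.floordiv rs.sum rs.length
      let gc := PySem.Int.floordiv gs.sum gs.length
      let bc := PySem.Int.floordiv bs.sum bs.length
      String.ofList ('#' :: (fmtChan rc ++ fmtChan gc ++ fmtChan bc))
  | _, _, _ => "#0123456"

-- ===== PORT B =====
-- _sums: divide-and-conquer (rsum, gsum, bsum, count); none = some int() raised ValueError
def sumsDC : List String → Option (Int × Int × Int × Int)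
  | [] => some (0, 0, 0, 0)
  | [c] =>
    match parseAt c 1, parseAt c 3, parseAt c 5 with
    | some x, some y, some z => some (x, y, z, 1)
    | _, _, _ => none
  | c1 :: c2 :: rest =>
    let l := c1 :: c2 :: rest
    let k := l.length / 2
    match sumsDC (l.take k), sumsDC (l.drop k) with
    | some (r1, g1, b1, n1), some (r2, g2, b2, n2) =>
        some (r1 + r2, g1 + g2, b1 + b2, n1 + n2)
    | _, _ => none
termination_by l => l.length
decreasing_by
  · simp [List.length_take]; omega
  · simp; omega

def avgClr_alt (clrs : List String) : String :=
  match sumsDC clrs with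
  | none => "#0123456"
  | some (r, g, b, n) =>
    if n = 0 then "#0123456"   -- ZeroDivisionError caught by the bare except
    else
      String.ofList ('#' :: (fmtChan (PySem.Int.floordiv r n) ++
        fmtChan (PySem.Int.floordiv g n) ++ fmtChan (PySem.Int.floordiv b n)))

-- ===== PRECONDITION & SPEC =====
def Spec_avgClr (clrs : List String) (out : String) : Prop := out = avgClr_alt clrs
instance (clrs : List String) (out : String) : Decidable (Spec_avgClr clrs out) := by unfold Spec_avgClr; infer_instance

-- ===== CLAIM (what is proved, stated in full; the proofs are below) =====
def Claim_equal_avgClr : Prop := ∀ (clrs : List String), Dom_avgClr clrs → Spec_avgClr clrs (avgClr clrs)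

-- ===== LEMMAS AND PROOFS =====

theorem compAt_length {i : Int} : ∀ {clrs : List String} {vs : List Int},
    compAt i clrs = some vs → vs.length = clrs.length := by
  intro clrs
  induction clrs with
  | nil => intro vs h; simp [compAt] at h; simp [← h]
  | cons c rest ih =>
    intro vs h
    simp only [compAt] at h
    cases hp : parseAt c i with
    | none => rw [hp] at h; simp at h
    | some v =>
      rw [hp] at h
      cases hr : compAt i rest with
      | none => rw [hr] at h; simp at h
      | some ws =>
        rw [hr] at h
        simp at h
        simp [← h, ih hr]

theorem compAt_append {i : Int} : ∀ (l1 l2 : List String),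
    compAt i (l1 ++ l2) =
      match compAt i l1, compAt i l2 with
      | some a, some b => some (a ++ b)
      | _, _ => none := by
  intro l1 l2
  induction l1 with
  | nil => simp [compAt]; cases compAt i l2 <;> simp
  | cons c rest ih =>
    simp only [List.cons_append, compAt, ih]
    cases parseAt c i <;> cases compAt i rest <;> cases compAt i l2 <;> simp

theorem sumsDC_eq_aux : ∀ (n : Nat) (l : List String), l.length ≤ n →
    sumsDC l =
      match compAt 1 l, compAt 3 l, compAt 5 l with
      | some rs, some gs, some bs => some (rs.sum, gs.sum, bs.sum, (l.length : Int))
      | _, _, _ => none := by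
  intro n
  induction n with
  | zero =>
    intro l h
    have hl : l = [] := List.eq_nil_of_length_eq_zero (Nat.le_zero.mp h)
    subst hl
    simp [sumsDC, compAt]
  | succ n ih =>
    intro l h
    match l with
    | [] => simp [sumsDC, compAt]
    | [c] =>
      simp only [sumsDC, compAt]
      cases parseAt c 1 <;> cases parseAt c 3 <;> cases parseAt c 5 <;> simp
    | c1 :: c2 :: rest =>
      rw [sumsDC]
      have hk1 : ((c1 :: c2 :: rest).take ((c1 :: c2 :: rest).length / 2)).length ≤ n := by
        simp at h ⊢; omega
      have hk2 : ((c1 :: c2 :: rest).drop ((c1 :: c2 :: rest).length / 2)).length ≤ n := by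
        simp at h ⊢; omega
      rw [ih _ hk1, ih _ hk2]
      conv_rhs => rw [← List.take_append_drop ((c1 :: c2 :: rest).length / 2) (c1 :: c2 :: rest)]
      rw [compAt_append, compAt_append, compAt_append]
      cases compAt 1 ((c1 :: c2 :: rest).take ((c1 :: c2 :: rest).length / 2)) <;>
        cases compAt 1 ((c1 :: c2 :: rest).drop ((c1 :: c2 :: rest).length / 2)) <;>
        cases compAt 3 ((c1 :: c2 :: rest).take ((c1 :: c2 :: rest).length / 2)) <;>
        cases compAt 3 ((c1 :: c2 :: rest).drop ((c1 :: c2 :: rest).length / 2)) <;>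
        cases compAt 5 ((c1 :: c2 :: rest).take ((c1 :: c2 :: rest).length / 2)) <;>
        cases compAt 5 ((c1 :: c2 :: rest).drop ((c1 :: c2 :: rest).length / 2)) <;>
        simp [List.length_take, List.length_drop] <;> omega

theorem sumsDC_eq (l : List String) :
    sumsDC l =
      match compAt 1 l, compAt 3 l, compAt 5 l with
      | some rs, some gs, some bs => some (rs.sum, gs.sum, bs.sum, (l.length : Int))
      | _, _, _ => none :=
  sumsDC_eq_aux l.length l (Nat.le_refl _)

-- ===== VERDICT (by name: the statement is the Claim_ definition above) =====
theorem avgClr_spec : Claim_equal_avgClr := by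
  intro clrs _
  unfold Spec_avgClr avgClr avgClr_alt
  rw [sumsDC_eq]
  cases hr : compAt 1 clrs with
  | none => simp
  | some rs =>
    cases hg : compAt 3 clrs with
    | none => simp
    | some gs =>
      cases hb : compAt 5 clrs with
      | none => simp
      | some bs =>
        have lr := compAt_length hr
        have lg := compAt_length hg
        have lb := compAt_length hb
        by_cases h0 : rs.length = 0
        · have : (clrs.length : Int) = 0 := by omega
          simp [h0, this]
        · have hn : (clrs.length : Int) ≠ 0 := by omega
          have h0' : rs.length ≠ 0 := h0
          have hne : clrs ≠ [] := fun hE => h0' (by rw [lr, hE]; rfl)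
          simp only [if_neg h0']
          rw [lr, lg, lb]
          simp [hne]
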